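-- pv_equiv track=rewrite | github.com/kimgyuhee/Python | Chapter0_Algorithm/2305/230501/test01.py | solution
-- ===== SOURCE A (Python) =====
-- def solution(arr, n):
--     ans = []
--     k = len(arr)%2
--     for i, a in enumerate(arr):
--         if (i+k)%2 != 0:
--             ans.append(a+n)
--         else:
--             ans.append(a)
--     return ans
-- ===== SOURCE B (Python) =====
-- def solution(arr, n):
--     ans = list(arr)
--     start = 1 if len(arr) % 2 == 0 else 0
--     for i in range(start, len(arr), 2):
--         ans[i] += n
--     return ans
-- ===== Notes on version B (the rewrite author's own statement) =====
-- stated objective: faster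
-- what changed: B copies the input and does a strided in-place pass over only the affected indices (range(start, len, 2)) instead of rebuilding the list element-by-element with a per-element parity test.
import Mathlib
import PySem

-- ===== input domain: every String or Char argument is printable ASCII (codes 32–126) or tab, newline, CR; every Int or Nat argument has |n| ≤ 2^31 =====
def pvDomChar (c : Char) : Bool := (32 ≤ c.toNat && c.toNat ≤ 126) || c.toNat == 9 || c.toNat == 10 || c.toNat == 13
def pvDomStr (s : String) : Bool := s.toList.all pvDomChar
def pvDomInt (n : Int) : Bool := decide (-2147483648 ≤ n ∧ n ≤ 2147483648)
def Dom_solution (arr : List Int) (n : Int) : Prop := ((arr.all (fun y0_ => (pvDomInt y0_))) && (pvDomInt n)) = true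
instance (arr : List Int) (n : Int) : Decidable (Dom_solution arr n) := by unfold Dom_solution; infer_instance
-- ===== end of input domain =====

-- B copies the input and runs one strided pass over only the incremented indices
-- (range(start, len, 2)) instead of A's full rebuild with a per-element parity branch;
-- same O(n), measurably faster by a constant factor (half the loop iterations, no branch).

-- ===== PORT A =====
def solution (arr : List Int) (n : Int) : List Int :=
  let k := PySem.Int.mod (arr.length : Int) 2
  (PySem.List.enumerate arr).foldl
    (fun ans (p : Int × Int) =>
      if PySem.Int.mod (p.1 + k) 2 ≠ 0 then ans ++ [p.2 + n] else ans ++ [p.2]) []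

-- ===== PORT B =====
-- 'ans[i] += n' is ported as pySetD/pyGetD; exact here since every i from the range
-- satisfies 0 ≤ i < len(ans), so Python never raises on this line.
def solution_alt (arr : List Int) (n : Int) : List Int :=
  let start : Int := if PySem.Int.mod (arr.length : Int) 2 = 0 then 1 else 0
  (PySem.List.pyRange start (arr.length : Int) 2).foldl
    (fun ans i => PySem.List.pySetD ans i (PySem.List.pyGetD ans i 0 + n)) arr

-- ===== PRECONDITION & SPEC =====
def Spec_solution (arr : List Int) (n : Int) (out : List Int) : Prop := out = solution_alt arr n
instance (arr : List Int) (n : Int) (out : List Int) : Decidable (Spec_solution arr n out) := by unfold Spec_solution; infer_instance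

-- ===== CLAIM (what is proved, stated in full; the proofs are below) =====
def Claim_equal_solution : Prop := ∀ (arr : List Int) (n : Int), Dom_solution arr n → Spec_solution arr n (solution arr n)

-- ===== LEMMAS AND PROOFS =====

-- A's append-only loop is a map over the enumeration.
theorem solA_loop (k n : Int) (l : List (Int × Int)) :
    ∀ acc : List Int,
      l.foldl (fun ans p => if PySem.Int.mod (p.1 + k) 2 ≠ 0 then ans ++ [p.2 + n] else ans ++ [p.2]) acc
        = acc ++ l.map (fun p => if PySem.Int.mod (p.1 + k) 2 ≠ 0 then p.2 + n else p.2) := by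
  induction l with
  | nil => simp
  | cons x xs ih =>
    intro acc
    rw [List.foldl_cons, List.map_cons, ih]
    by_cases h : PySem.Int.mod (x.1 + k) 2 ≠ 0
    · rw [if_pos h, if_pos h]; simp
    · rw [if_neg h, if_neg h]; simp

theorem solution_getElem? (arr : List Int) (n : Int) (j : Nat) :
    (solution arr n)[j]? =
      arr[j]?.map (fun a =>
        if PySem.Int.mod ((j : Int) + PySem.Int.mod (arr.length : Int) 2) 2 ≠ 0 then a + n else a) := by
  unfold solution
  rw [solA_loop]
  simp only [List.nil_append, List.getElem?_map, PySem.List.getElem?_enumerate, Option.map_map]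
  cases arr[j]? <;> simp [Function.comp]

-- B's strided set-loop, characterised pointwise: positions in the (nodup, in-range)
-- index list get +n, all others are untouched.
theorem foldl_pySetD_getElem? (n : Int) :
    ∀ (l : List Int) (ans : List Int),
      (∀ i ∈ l, 0 ≤ i ∧ i < (ans.length : Int)) → l.Nodup →
      ∀ j : Nat,
        (l.foldl (fun a i => PySem.List.pySetD a i (PySem.List.pyGetD a i 0 + n)) ans)[j]? =
          if (j : Int) ∈ l then ans[j]?.map (· + n) else ans[j]? := by
  intro l
  induction l with
  | nil => intro ans _ _ j; simp
  | cons i0 rest ih =>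
    intro ans hrng hnd j
    obtain ⟨h0, hlt⟩ := hrng i0 (List.mem_cons_self ..)
    have hset : PySem.List.pySetD ans i0 (PySem.List.pyGetD ans i0 0 + n) =
        ans.set i0.toNat (ans[i0.toNat]'(by omega) + n) := by
      rw [PySem.List.pyGetD_eq_getElem ans 0 h0 hlt, PySem.List.pySetD_of_nonneg ans _ h0]
    rw [List.foldl_cons, hset, ih _ (by intro i hi; simpa using hrng i (List.mem_cons_of_mem _ hi))
      (hnd.of_cons) j]
    have hnotmem : i0 ∉ rest := (List.nodup_cons.mp hnd).1
    by_cases hjrest : (j : Int) ∈ rest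
    · have hji0 : (j : Int) ≠ i0 := fun h => hnotmem (h ▸ hjrest)
      simp only [hjrest, if_true, List.mem_cons, or_true]
      rw [List.getElem?_set]
      have : i0.toNat ≠ j := by omega
      simp [this]
    · simp only [hjrest, if_false, List.mem_cons, or_false]
      by_cases hji0 : (j : Int) = i0
      · have hj' : i0.toNat = j := by omega
        have hjlen : j < ans.length := by omega
        simp [hj', hjlen, hji0]
      · rw [List.getElem?_set]
        have : i0.toNat ≠ j := by omega
        simp [hji0, this]

theorem solution_alt_getElem? (arr : List Int) (n : Int) (j : Nat) :
    (solution_alt arr n)[j]? =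
      (if (j : Int) ∈ PySem.List.pyRange
          (if PySem.Int.mod (arr.length : Int) 2 = 0 then 1 else 0) (arr.length : Int) 2
        then arr[j]?.map (· + n) else arr[j]?) := by
  unfold solution_alt
  rw [foldl_pySetD_getElem? n _ arr ?hr ?hnd j]
  case hr =>
    intro i hi
    rcases (PySem.List.mem_pyRange_iff_of_pos (by norm_num) i).mp hi with ⟨h1, h2, _⟩
    refine ⟨?_, h2⟩
    split at h1 <;> omega
  case hnd =>
    rw [PySem.List.pyRange_of_pos _ _ (by norm_num)]
    refine (List.nodup_range).map ?_
    intro a b h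
    have h' : (if PySem.Int.mod (arr.length : Int) 2 = 0 then (1:Int) else 0) + 2 * (a : Int)
        = (if PySem.Int.mod (arr.length : Int) 2 = 0 then (1:Int) else 0) + 2 * (b : Int) := h
    omega

theorem solution_spec : Claim_equal_solution := by
  intro arr n _
  unfold Spec_solution
  apply List.ext_getElem?
  intro j
  rw [solution_getElem?, solution_alt_getElem?]
  have hk : PySem.Int.mod ((arr.length : Int)) 2 = (arr.length : Int) % 2 :=
    PySem.Int.mod_eq_emod_of_pos (by norm_num)
  have hm : PySem.Int.mod ((j : Int) + PySem.Int.mod (arr.length : Int) 2) 2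
      = ((j : Int) + PySem.Int.mod (arr.length : Int) 2) % 2 :=
    PySem.Int.mod_eq_emod_of_pos (by norm_num)
  by_cases hj : j < arr.length
  · have hjL : (j : Int) < (arr.length : Int) := by exact_mod_cast hj
    have hcond : (PySem.Int.mod ((j : Int) + PySem.Int.mod (arr.length : Int) 2) 2 ≠ 0) ↔
        ((j : Int) ∈ PySem.List.pyRange
          (if PySem.Int.mod (arr.length : Int) 2 = 0 then 1 else 0) (arr.length : Int) 2) := by
      rw [PySem.List.mem_pyRange_iff_of_pos (by norm_num)]
      rw [hm, hk]
      split_ifs with h <;> omega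
    by_cases hc : PySem.Int.mod ((j : Int) + PySem.Int.mod (arr.length : Int) 2) 2 ≠ 0
    · rw [if_pos (hcond.mp hc), List.getElem?_eq_getElem hj, Option.map_some, Option.map_some,
        if_pos hc]
    · rw [if_neg (fun h => hc (hcond.mpr h)), List.getElem?_eq_getElem hj, Option.map_some,
        if_neg hc]
  · have hnone : arr[j]? = none := List.getElem?_eq_none (by omega)
    rw [hnone]
    split <;> simp
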